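-- pv_equiv track=rewrite | github.com/iOTMecit/TRADE | Other Python Scripts/NicadSimianRelativeRecallUnique.py | count_unique_clone_classes
-- ===== SOURCE A (Python) =====
-- def are_sources_similar(src1, src2):
--     file1, start1, end1 = src1
--     file2, start2, end2 = src2
--     return file1 == file2 and abs(start1 - start2) <= 5 and abs(end1 - end2) <= 5
--
-- def are_clone_classes_similar(class1, class2):
--     # Check if two clone classes are similar based on file names and line ranges
--     return all(
--         any(are_sources_similar(src1, src2) for src2 in class2)
--         for src1 in class1
--     ) and all(
--         any(are_sources_similar(src2, src1) for src1 in class1)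
--         for src2 in class2
--     )
--
-- def count_unique_clone_classes(nicad_classes, simian_classes):
--     unique_classes = []
--     for nicad_class in nicad_classes:
--         unique_classes.append(nicad_class)
--     for simian_class in simian_classes:
--         if not any(are_clone_classes_similar(simian_class, unique_class) for unique_class in unique_classes):
--             unique_classes.append(simian_class)
--     return len(unique_classes)
-- ===== SOURCE B (Python) =====
-- def count_unique_clone_classes(nicad_classes, simian_classes):
--     # Bucket classes by the frozenset of their file names: two classes can only
--     # be "similar" when their file-name sets are identical, so each simian class
--     # is compared only against the classes in its own bucket.
--     buckets = {}
--     for cls in nicad_classes: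
--         buckets.setdefault(frozenset(src[0] for src in cls), []).append(cls)
--     count = len(nicad_classes)
--     for cls in simian_classes:
--         bucket = buckets.setdefault(frozenset(src[0] for src in cls), [])
--         if not any(_classes_similar(cls, u) for u in bucket):
--             bucket.append(cls)
--             count += 1
--     return count
--
--
-- def _matches_some(src, cls):
--     file1, start1, end1 = src
--     for file2, start2, end2 in cls:
--         if file1 == file2 and abs(start1 - start2) <= 5 and abs(end1 - end2) <= 5:
--             return True
--     return False
--
--
-- def _classes_similar(class1, class2):
--     for src in class1:
--         if not _matches_some(src, class2):
--             return False
--     for src in class2: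
--         if not _matches_some(src, class1):
--             return False
--     return True
-- ===== Notes on version B (the rewrite author's own statement) =====
-- stated objective: faster
-- what changed: B indexes the growing pool of unique classes in a dict keyed by the frozenset of each class's file names (similarity forces identical file-name sets), so each simian class is compared only against its own bucket instead of scanning the whole pool.
import Mathlib
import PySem

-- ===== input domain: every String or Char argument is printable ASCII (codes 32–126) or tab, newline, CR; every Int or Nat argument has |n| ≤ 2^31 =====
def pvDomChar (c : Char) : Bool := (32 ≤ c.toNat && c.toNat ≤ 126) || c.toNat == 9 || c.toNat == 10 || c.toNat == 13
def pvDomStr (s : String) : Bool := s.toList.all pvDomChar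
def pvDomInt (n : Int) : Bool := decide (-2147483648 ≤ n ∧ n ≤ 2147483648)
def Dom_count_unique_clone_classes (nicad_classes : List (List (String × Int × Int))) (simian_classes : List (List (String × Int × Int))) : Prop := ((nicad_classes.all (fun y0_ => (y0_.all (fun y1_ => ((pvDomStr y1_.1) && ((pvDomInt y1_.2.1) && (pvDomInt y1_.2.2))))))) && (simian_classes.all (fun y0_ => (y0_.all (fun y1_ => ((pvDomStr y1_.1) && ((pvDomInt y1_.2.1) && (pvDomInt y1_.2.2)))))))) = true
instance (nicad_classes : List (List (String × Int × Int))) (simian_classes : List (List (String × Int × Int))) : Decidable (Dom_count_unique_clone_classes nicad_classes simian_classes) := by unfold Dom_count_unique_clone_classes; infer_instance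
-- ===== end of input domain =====

-- B buckets the pool of unique classes in a dict keyed by the (frozen)set of each class's
-- file names — similar classes necessarily have identical file-name sets — so each simian
-- class is compared only against its own bucket instead of the whole pool; objective: faster.


-- ===== PORT A =====
def are_sources_similar (src1 src2 : String × Int × Int) : Bool :=
  src1.1 == src2.1 && decide ((src1.2.1 - src2.2.1).natAbs ≤ 5) && decide ((src1.2.2 - src2.2.2).natAbs ≤ 5)

def are_clone_classes_similar (class1 class2 : List (String × Int × Int)) : Bool :=
  (class1.all (fun src1 => class2.any (fun src2 => are_sources_similar src1 src2))) &&
  (class2.all (fun src2 => class1.any (fun src1 => are_sources_similar src2 src1)))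

def count_unique_clone_classes (nicad_classes : List (List (String × Int × Int))) (simian_classes : List (List (String × Int × Int))) : Int :=
  let init := nicad_classes.foldl (fun acc c => acc ++ [c]) []
  let uc := simian_classes.foldl (fun acc c =>
      if !(acc.any (fun u => are_clone_classes_similar c u)) then acc ++ [c] else acc) init
  (uc.length : Int)

-- ===== PORT B =====
-- _matches_some of Source B: does some source of cls match src (same file, both line gaps ≤ 5)?
def matches_some (src : String × Int × Int) : List (String × Int × Int) → Bool
  | [] => false
  | t :: rest =>
      (src.1 == t.1 && decide ((src.2.1 - t.2.1).natAbs ≤ 5) && decide ((src.2.2 - t.2.2).natAbs ≤ 5))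
      || matches_some src rest

def classes_similar (class1 class2 : List (String × Int × Int)) : Bool :=
  class1.all (fun s => matches_some s class2) && class2.all (fun s => matches_some s class1)

-- frozenset of the class's file names, represented canonically as the sorted list of its
-- distinct elements (exact: frozensets are compared by set equality).
def class_key (c : List (String × Int × Int)) : List String :=
  PySem.List.sorted (PySem.Set.ofList (c.map (·.1))) (fun x => x) false

def count_unique_clone_classes_alt (nicad_classes : List (List (String × Int × Int))) (simian_classes : List (List (String × Int × Int))) : Int :=
  let d0 : PySem.Dict (List String) (List (List (String × Int × Int))) :=
    (nicad_classes.map (fun c => (class_key c, c))).foldl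
      (fun d p => d.modify p.1 [] (· ++ [p.2])) PySem.Dict.empty
  let res := simian_classes.foldl
    (fun (st : PySem.Dict (List String) (List (List (String × Int × Int))) × Int) c =>
      let k := class_key c
      let bucket := st.1.getD k []
      if bucket.any (fun u => classes_similar c u) then st
      else (st.1.modify k [] (· ++ [c]), st.2 + 1))
    (d0, (nicad_classes.length : Int))
  res.2

-- ===== PRECONDITION & SPEC =====
def Spec_count_unique_clone_classes (nicad_classes : List (List (String × Int × Int))) (simian_classes : List (List (String × Int × Int))) (out : Int) : Prop := out = count_unique_clone_classes_alt nicad_classes simian_classes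
instance (nicad_classes : List (List (String × Int × Int))) (simian_classes : List (List (String × Int × Int))) (out : Int) : Decidable (Spec_count_unique_clone_classes nicad_classes simian_classes out) := by unfold Spec_count_unique_clone_classes; infer_instance

-- ===== CLAIM (what is proved, stated in full; the proofs are below) =====
def Claim_equal_count_unique_clone_classes : Prop := ∀ (nicad_classes : List (List (String × Int × Int))) (simian_classes : List (List (String × Int × Int))), Dom_count_unique_clone_classes nicad_classes simian_classes → Spec_count_unique_clone_classes nicad_classes simian_classes (count_unique_clone_classes nicad_classes simian_classes)

-- ===== LEMMAS AND PROOFS =====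

-- B's hand-rolled inner scan is A's `any` over the class.
theorem matches_some_eq_any (src : String × Int × Int) (c : List (String × Int × Int)) :
    matches_some src c = c.any (fun t => are_sources_similar src t) := by
  induction c with
  | nil => rfl
  | cons t rest ih => simp [matches_some, are_sources_similar, ih]

theorem classes_similar_eq (c1 c2 : List (String × Int × Int)) :
    classes_similar c1 c2 = are_clone_classes_similar c1 c2 := by
  simp [classes_similar, are_clone_classes_similar, matches_some_eq_any]

-- Similar classes have the same canonical file-name key: each direction of the all/any
-- forces every file name of one class to occur in the other.
theorem key_eq_of_similar (c u : List (String × Int × Int))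
    (h : are_clone_classes_similar c u = true) : class_key c = class_key u := by
  simp only [are_clone_classes_similar, Bool.and_eq_true, List.all_eq_true, List.any_eq_true] at h
  obtain ⟨h1, h2⟩ := h
  have hmem : ∀ x, x ∈ c.map (·.1) ↔ x ∈ u.map (·.1) := by
    intro x
    constructor
    · intro hx
      obtain ⟨s, hs, hsx⟩ := List.mem_map.mp hx
      obtain ⟨t, ht, hst⟩ := h1 s hs
      simp only [are_sources_similar, Bool.and_eq_true, beq_iff_eq] at hst
      exact List.mem_map.mpr ⟨t, ht, by rw [← hst.1.1, hsx]⟩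
    · intro hx
      obtain ⟨s, hs, hsx⟩ := List.mem_map.mp hx
      obtain ⟨t, ht, hst⟩ := h2 s hs
      simp only [are_sources_similar, Bool.and_eq_true, beq_iff_eq] at hst
      exact List.mem_map.mpr ⟨t, ht, by rw [← hst.1.1, hsx]⟩
  have hperm : (PySem.Set.ofList (c.map (·.1))).Perm (PySem.Set.ofList (u.map (·.1))) := by
    refine (List.perm_ext_iff_of_nodup ?_ ?_).mpr ?_
    · exact PySem.Set.nodup_ofList _
    · exact PySem.Set.nodup_ofList _
    · intro x
      simp only [PySem.Set.mem_ofList]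
      exact hmem x
  exact PySem.List.sorted_eq_sorted_of_perm _ _ _ (fun a b hab => hab) hperm

-- Scanning only the matching bucket decides exactly what scanning the whole pool decides.
theorem any_bucket_eq (c : List (String × Int × Int)) (uc : List (List (String × Int × Int))) :
    (uc.filter (fun u => class_key u == class_key c)).any (fun u => classes_similar c u)
      = uc.any (fun u => are_clone_classes_similar c u) := by
  rw [List.any_filter]
  apply PySem.List.any_congr_mem
  intro u _
  rw [classes_similar_eq]
  cases hs : are_clone_classes_similar c u with
  | false => simp
  | true => simp [key_eq_of_similar c u hs]

-- Loop invariant: B's dict holds, per key, exactly the sub-list of A's pool with that key,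
-- and B's counter is A's pool length.
theorem invariant_fold (simian : List (List (String × Int × Int)))
    (uc : List (List (String × Int × Int)))
    (d : PySem.Dict (List String) (List (List (String × Int × Int))))
    (cnt : Int)
    (H1 : ∀ k, d.getD k [] = uc.filter (fun u => class_key u == k))
    (H2 : cnt = (uc.length : Int)) :
    (simian.foldl
      (fun (st : PySem.Dict (List String) (List (List (String × Int × Int))) × Int) c =>
        let k := class_key c
        let bucket := st.1.getD k []
        if bucket.any (fun u => classes_similar c u) then st
        else (st.1.modify k [] (· ++ [c]), st.2 + 1))
      (d, cnt)).2
    = ((simian.foldl (fun acc c =>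
        if !(acc.any (fun u => are_clone_classes_similar c u)) then acc ++ [c] else acc) uc).length : Int) := by
  induction simian generalizing uc d cnt with
  | nil => simpa using H2
  | cons c rest ih =>
    simp only [List.foldl_cons]
    have hb : (d.getD (class_key c) []).any (fun u => classes_similar c u)
        = uc.any (fun u => are_clone_classes_similar c u) := by
      rw [H1, any_bucket_eq]
    cases hs : uc.any (fun u => are_clone_classes_similar c u) with
    | true =>
      rw [hs] at hb
      simp only [hb, if_true, Bool.not_true, Bool.false_eq_true, if_false]
      exact ih uc d cnt H1 H2
    | false =>
      rw [hs] at hb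
      simp only [hb, Bool.false_eq_true, if_false, Bool.not_false, if_true]
      apply ih (uc ++ [c])
      · intro k
        rw [PySem.Dict.getD_modify]
        by_cases hk : k = class_key c
        · subst hk
          rw [if_pos rfl, H1, List.filter_append]
          simp
        · rw [if_neg hk, H1, List.filter_append]
          have hne : (class_key c == k) = false := beq_eq_false_iff_ne.mpr (fun h => hk h.symm)
          simp [hne]
      · simp [H2]

-- ===== VERDICT (by name: the statement is the Claim_ definition above) =====
theorem count_unique_clone_classes_spec : Claim_equal_count_unique_clone_classes := by
  intro n s _
  unfold Spec_count_unique_clone_classes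
  simp only [count_unique_clone_classes, count_unique_clone_classes_alt]
  have H1 : ∀ k, ((n.map (fun c => (class_key c, c))).foldl
      (fun d p => d.modify p.1 [] (· ++ [p.2])) PySem.Dict.empty).getD k []
      = n.filter (fun u => class_key u == k) := by
    intro k
    rw [PySem.Dict.getD_foldl_modify_append]
    simp [List.filter_map, List.map_map, Function.comp_def]
  have h := invariant_fold s n _ (n.length : Int) H1 rfl
  rw [PySem.List.foldl_append_singleton]
  simpa using h.symm
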